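-- pv_equiv track=rewrite | github.com/Psikyy/KATARENGA-Co | Katarenga&Co.py | checkYellow
-- ===== SOURCE A (Python) =====
-- def checkYellow(pawn : tuple, case : tuple, board : list, tab_Y : list) -> bool:
--     """
--         Vérifie si un déplacement est possible pour un pion partant d'une case jaune
--         en s'assurant qu'il ne traverse pas d'autres cases jaunes.
--     """
--     temp_yellow = [elt for elt in tab_Y if elt != pawn]
--     x, y = pawn
--     i, j = case
--     if abs(i - x) != abs(j - y):
--         return False
--     dx = 1 if i > x else -1
--     dy = 1 if j > y else -1
--     current_x, current_y = x, y
--     while (current_x, current_y) != (i, j):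
--         current_x += dx
--         current_y += dy
--         if (current_x, current_y) in temp_yellow:
--             return False
--     return True
-- ===== SOURCE B (Python) =====
-- def checkYellow(pawn : tuple, case : tuple, board : list, tab_Y : list) -> bool:
--     """Blocker-scan re-implementation: instead of stepping along the diagonal,
--     test each yellow cell for lying strictly on the move's diagonal segment."""
--     x, y = pawn
--     i, j = case
--     if abs(i - x) != abs(j - y):
--         return False
--     d = abs(i - x)
--     dx = 1 if i > x else -1
--     dy = 1 if j > y else -1
--     for (cx, cy) in tab_Y:
--         if (cx, cy) == pawn:
--             continue
--         k = (cx - x) * dx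
--         if k == (cy - y) * dy and 1 <= k <= d:
--             return False
--     return True
-- ===== Notes on version B (the rewrite author's own statement) =====
-- stated objective: alternative
-- what changed: Instead of marching cell by cell along the diagonal and testing membership in the yellow list at each step, B loops once over the yellow cells and tests each with an arithmetic collinearity/betweenness condition on the segment.
import Mathlib
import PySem

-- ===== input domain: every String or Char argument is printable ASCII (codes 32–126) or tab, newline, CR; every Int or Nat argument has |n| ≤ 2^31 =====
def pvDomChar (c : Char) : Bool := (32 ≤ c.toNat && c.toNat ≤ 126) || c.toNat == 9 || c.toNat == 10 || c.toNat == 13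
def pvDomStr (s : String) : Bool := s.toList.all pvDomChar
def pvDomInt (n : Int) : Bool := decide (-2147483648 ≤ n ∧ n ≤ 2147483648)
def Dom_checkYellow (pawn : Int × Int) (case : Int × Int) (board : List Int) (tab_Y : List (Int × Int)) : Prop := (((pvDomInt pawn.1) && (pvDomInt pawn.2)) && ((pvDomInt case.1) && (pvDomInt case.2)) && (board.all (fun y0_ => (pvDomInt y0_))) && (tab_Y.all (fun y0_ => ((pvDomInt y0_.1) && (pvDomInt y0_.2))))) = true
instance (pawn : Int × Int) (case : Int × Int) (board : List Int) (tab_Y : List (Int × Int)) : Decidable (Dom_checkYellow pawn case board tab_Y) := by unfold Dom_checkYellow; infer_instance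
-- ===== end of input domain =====

-- B replaces A's cell-by-cell diagonal march with a single scan of the yellow
-- cells using an arithmetic on-segment test; alternative decomposition, same result.


-- ===== PORT A =====
-- A's while loop; the Python loop takes exactly |i-x| steps once the diagonal
-- guard has passed, so the fuel argument only makes the same computation total.
def checkYellowLoop (temp : List (Int × Int)) (target : Int × Int) (dx dy : Int) :
    Nat → (Int × Int) → Bool
  | fuel, cur =>
    if cur = target then true
    else match fuel with
      | 0 => true
      | n+1 =>
        let c := (cur.1 + dx, cur.2 + dy)
        if c ∈ temp then false else checkYellowLoop temp target dx dy n c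

def checkYellow (pawn : Int × Int) (case : Int × Int) (board : List Int) (tab_Y : List (Int × Int)) : Bool :=
  let temp := tab_Y.filter (fun elt => elt ≠ pawn)
  let x := pawn.1
  let y := pawn.2
  let i := case.1
  let j := case.2
  if |i - x| ≠ |j - y| then false
  else
    let dx : Int := if i > x then 1 else -1
    let dy : Int := if j > y then 1 else -1
    checkYellowLoop temp case dx dy (i - x).natAbs (x, y)

-- ===== PORT B =====
def checkYellow_alt (pawn : Int × Int) (case : Int × Int) (board : List Int) (tab_Y : List (Int × Int)) : Bool :=
  let x := pawn.1
  let y := pawn.2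
  let i := case.1
  let j := case.2
  if |i - x| ≠ |j - y| then false
  else
    let d := |i - x|
    let dx : Int := if i > x then 1 else -1
    let dy : Int := if j > y then 1 else -1
    tab_Y.all (fun c =>
      if c = pawn then true
      else
        let k := (c.1 - x) * dx
        if k = (c.2 - y) * dy ∧ 1 ≤ k ∧ k ≤ d then false else true)

-- ===== PRECONDITION & SPEC =====
def Spec_checkYellow (pawn : Int × Int) (case : Int × Int) (board : List Int) (tab_Y : List (Int × Int)) (out : Bool) : Prop := out = checkYellow_alt pawn case board tab_Y
instance (pawn : Int × Int) (case : Int × Int) (board : List Int) (tab_Y : List (Int × Int)) (out : Bool) : Decidable (Spec_checkYellow pawn case board tab_Y out) := by unfold Spec_checkYellow; infer_instance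

-- ===== CLAIM (what is proved, stated in full; the proofs are below) =====
def Claim_equal_checkYellow : Prop := ∀ (pawn : Int × Int) (case : Int × Int) (board : List Int) (tab_Y : List (Int × Int)), Dom_checkYellow pawn case board tab_Y → Spec_checkYellow pawn case board tab_Y (checkYellow pawn case board tab_Y)

-- ===== LEMMAS AND PROOFS =====

/-- The cells A's loop visits (excluding the start, including the target). -/
def pathCells (dx dy : Int) : Nat → (Int × Int) → List (Int × Int)
  | 0, _ => []
  | n+1, cur =>
    let c := (cur.1 + dx, cur.2 + dy)
    c :: pathCells dx dy n c

lemma mem_pathCells (dx dy : Int) :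
    ∀ (n : Nat) (cur c : Int × Int),
      c ∈ pathCells dx dy n cur ↔
        ∃ k : Nat, k < n ∧ c = (cur.1 + (k+1) * dx, cur.2 + (k+1) * dy) := by
  intro n
  induction n with
  | zero => intro cur c; simp [pathCells]
  | succ m ih =>
    intro cur c
    simp only [pathCells, List.mem_cons, ih]
    constructor
    · rintro (rfl | ⟨k, hk, rfl⟩)
      · exact ⟨0, by omega, by simp⟩
      · refine ⟨k + 1, by omega, ?_⟩
        simp only [Prod.mk.injEq]
        constructor <;> push_cast <;> ring
    · rintro ⟨k, hk, rfl⟩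
      match k with
      | 0 => left; simp
      | k+1 =>
        right
        refine ⟨k, by omega, ?_⟩
        simp only [Prod.mk.injEq]
        constructor <;> push_cast <;> ring

lemma checkYellowLoop_eq (temp : List (Int × Int)) (target : Int × Int) (dx dy : Int)
    (hdx : dx = 1 ∨ dx = -1) :
    ∀ (n : Nat) (cur : Int × Int),
      target.1 = cur.1 + n * dx → target.2 = cur.2 + n * dy →
      checkYellowLoop temp target dx dy n cur
        = (pathCells dx dy n cur).all (fun c => !(decide (c ∈ temp))) := by
  intro n
  induction n with
  | zero =>
    intro cur h1 h2
    have : cur = target := by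
      apply Prod.ext <;> simp at h1 h2 <;> omega
    simp [checkYellowLoop, this, pathCells]
  | succ m ih =>
    intro cur h1 h2
    have hne : cur ≠ target := by
      intro h
      rw [h] at h1
      rcases hdx with rfl | rfl <;> [skip; skip] <;> push_cast at h1 <;> omega
    rw [checkYellowLoop]
    simp only [if_neg hne]
    have h1' : target.1 = (cur.1 + dx) + m * dx := by rw [h1]; push_cast; ring
    have h2' : target.2 = (cur.2 + dy) + m * dy := by rw [h2]; push_cast; ring
    by_cases hmem : (cur.1 + dx, cur.2 + dy) ∈ temp
    · simp [pathCells, hmem]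
    · simp only [pathCells, List.all_cons, hmem, decide_false, Bool.not_false, Bool.true_and]
      exact ih (cur.1 + dx, cur.2 + dy) h1' h2'

/-- B's arithmetic test picks out exactly the cells on A's path. -/
lemma onSegment_iff_mem_path (x y : Int) (dx dy : Int) (d : Int)
    (hdx : dx = 1 ∨ dx = -1) (hdy : dy = 1 ∨ dy = -1) (hd : 0 ≤ d) (c : Int × Int) :
    ((c.1 - x) * dx = (c.2 - y) * dy ∧ 1 ≤ (c.1 - x) * dx ∧ (c.1 - x) * dx ≤ d)
      ↔ c ∈ pathCells dx dy d.toNat (x, y) := by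
  obtain ⟨c1, c2⟩ := c
  rw [mem_pathCells]
  simp only [Prod.mk.injEq]
  rcases hdx with rfl | rfl <;> rcases hdy with rfl | rfl <;>
    simp only [mul_one, mul_neg_one, neg_sub] <;> constructor
  all_goals
    first
      | (rintro ⟨heq, h1, h2⟩
         exact ⟨(c1 - x).natAbs - 1, by omega, by omega, by omega⟩)
      | (rintro ⟨k, hk, rfl, rfl⟩
         refine ⟨by omega, by omega, by omega⟩)

lemma main_branch (x y i j : Int) (tab_Y : List (Int × Int)) (dx dy : Int)
    (hdx : dx = 1 ∨ dx = -1) (hdy : dy = 1 ∨ dy = -1)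
    (hi : i = x + ((i - x).natAbs : Int) * dx)
    (hj : j = y + ((i - x).natAbs : Int) * dy) :
    checkYellowLoop (tab_Y.filter (fun elt => elt ≠ (x, y))) (i, j) dx dy (i - x).natAbs (x, y)
      = tab_Y.all (fun c =>
          if c = (x, y) then true
          else if (c.1 - x) * dx = (c.2 - y) * dy ∧ 1 ≤ (c.1 - x) * dx ∧ (c.1 - x) * dx ≤ |i - x| then false
          else true) := by
  rw [checkYellowLoop_eq _ _ _ _ hdx _ _ (by simpa using hi) (by simpa using hj)]
  have hseg := onSegment_iff_mem_path x y dx dy |i - x| hdx hdy (abs_nonneg _)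
  have htn : (|i - x|).toNat = (i - x).natAbs := by
    rcases abs_cases (i - x) with ⟨h, _⟩ | ⟨h, _⟩ <;> omega
  rw [htn] at hseg
  rw [Bool.eq_iff_iff]
  simp only [List.all_eq_true]
  constructor
  · intro h c hc
    split_ifs with hp hs
    · rfl
    · exfalso
      have hmem := (hseg c).mp hs
      have := h c hmem
      simp [List.mem_filter, hc, hp] at this
    · rfl
  · intro h c hc
    simp only [Bool.not_eq_eq_eq_not, Bool.not_true, decide_eq_false_iff_not, List.mem_filter,
      not_and]
    intro hct hcp
    have hcp' : c ≠ (x, y) := by simpa using hcp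
    have hs := (hseg c).mpr hc
    have := h c hct
    rw [if_neg hcp', if_pos hs] at this
    exact absurd this (by simp)

theorem checkYellow_spec : Claim_equal_checkYellow := by
  intro pawn case board tab_Y _
  unfold Spec_checkYellow checkYellow checkYellow_alt
  obtain ⟨x, y⟩ := pawn
  obtain ⟨i, j⟩ := case
  by_cases hg : |i - x| ≠ |j - y|
  · rw [if_pos hg, if_pos hg]
  · simp only [hg, if_false]
    rw [not_not, Int.abs_eq_natAbs, Int.abs_eq_natAbs] at hg
    by_cases hx : i > x <;> by_cases hy : j > y <;>
      simp only [hx, hy, if_true, if_false] <;>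
      exact main_branch x y i j tab_Y _ _ (by simp) (by simp) (by omega) (by omega)
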